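-- pv_equiv track=rewrite | github.com/jyajoo/Problem-Solving | Programmers/Sort/42747.py | solution
-- ===== SOURCE A (Python) =====
-- from collections import Counter
--
-- def solution(citations):
--     citations.sort(reverse = True)
--     counts = dict(Counter(citations))
--     for h in range(len(citations), 0, -1):
--         x, y = 0, 0
--
--         for k, v in counts.items():
--             if k >= h:
--                 x += v
--             if k <= h:
--                 y += v
--         if x >= h and y <= h:
--             return h
--     return 0
-- ===== SOURCE B (Python) =====
-- def solution(citations):
--     s = sorted(citations)
--     n = len(s)
--     i = n  # first index with s[idx] >= h, maintained as h descends
--     j = n  # first index with s[idx] > h, maintained as h descends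
--     for h in range(n, 0, -1):
--         while i > 0 and s[i - 1] >= h:
--             i -= 1
--         while j > 0 and s[j - 1] > h:
--             j -= 1
--         if n - i >= h and j <= h:
--             return h
--     return 0
-- ===== Notes on version B (the rewrite author's own statement) =====
-- stated objective: faster
-- what changed: B sorts once ascending and sweeps h from n down with two monotone pointers (first index >= h and first index > h), so the per-h counts cost amortized O(n) total instead of A's per-h scan over a Counter of distinct values.
import Mathlib
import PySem

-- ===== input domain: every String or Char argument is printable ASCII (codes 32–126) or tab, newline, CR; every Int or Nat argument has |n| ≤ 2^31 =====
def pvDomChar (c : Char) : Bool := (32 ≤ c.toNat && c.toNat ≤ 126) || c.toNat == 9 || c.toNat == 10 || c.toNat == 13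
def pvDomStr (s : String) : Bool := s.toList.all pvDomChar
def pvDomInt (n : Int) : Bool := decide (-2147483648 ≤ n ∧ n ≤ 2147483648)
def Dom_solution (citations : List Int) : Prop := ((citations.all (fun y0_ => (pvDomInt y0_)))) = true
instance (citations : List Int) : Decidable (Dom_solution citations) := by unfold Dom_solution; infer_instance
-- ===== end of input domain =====

-- B replaces A's per-h scan over a Counter by one ascending sort and two monotone pointers
-- swept as h descends (objective: faster). Equivalence is about the RETURN value only:
-- Python A sorts `citations` in place, B leaves its argument unchanged.

-- ===== PORT A =====
-- inner `for k, v in counts.items()` loop accumulating (x, y)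
def solA_inner (counts : PySem.Dict Int Int) (hh : Int) : Int × Int :=
  counts.items.foldl (fun xy kv =>
    (if kv.1 ≥ hh then xy.1 + kv.2 else xy.1,
     if kv.1 ≤ hh then xy.2 + kv.2 else xy.2)) (0, 0)

-- `for h in range(len(citations), 0, -1)` with early return
def solA_loop (counts : PySem.Dict Int Int) : Nat → Int
  | 0 => 0
  | h + 1 =>
    let hh : Int := (h : Int) + 1
    let xy := solA_inner counts hh
    if xy.1 ≥ hh ∧ xy.2 ≤ hh then hh else solA_loop counts h

def solution (citations : List Int) : Int :=
  let s := PySem.List.sorted citations (fun x => x) true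
  let counts := PySem.Dict.counter s
  solA_loop counts s.length

-- ===== PORT B =====
-- `while i > 0 and p(s[i-1]): i -= 1`  (p is the continue test on s[i-1]; index is in range)
def descWhile (s : List Int) (p : Int → Bool) : Nat → Nat
  | 0 => 0
  | i + 1 => if p (PySem.List.pyGetD s (i : Int) 0) then descWhile s p i else i + 1

-- `for h in range(n, 0, -1)` carrying the two pointers i, j
def solB_loop (s : List Int) (n : Nat) : Nat → Nat → Nat → Int
  | 0, _, _ => 0
  | h + 1, i, j =>
    let hh : Int := (h : Int) + 1
    let i' := descWhile s (fun a => hh ≤ a) i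
    let j' := descWhile s (fun a => hh < a) j
    if (n : Int) - (i' : Int) ≥ hh ∧ (j' : Int) ≤ hh then hh else solB_loop s n h i' j'

def solution_alt (citations : List Int) : Int :=
  let s := PySem.List.sorted citations (fun x => x) false
  solB_loop s s.length s.length s.length s.length

-- ===== PRECONDITION & SPEC =====
def Spec_solution (citations : List Int) (out : Int) : Prop := out = solution_alt citations
instance (citations : List Int) (out : Int) : Decidable (Spec_solution citations out) := by unfold Spec_solution; infer_instance

-- ===== CLAIM (what is proved, stated in full; the proofs are below) =====
def Claim_equal_solution : Prop := ∀ (citations : List Int), Dom_solution citations → Spec_solution citations (solution citations)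

-- ===== LEMMAS AND PROOFS =====

-- common reference: first h in n..1 with |{a ≥ h}| ≥ h and |{a ≤ h}| ≤ h, else 0
def firstH (xs : List Int) : Nat → Int
  | 0 => 0
  | h + 1 =>
    let hh : Int := (h : Int) + 1
    if hh ≤ (xs.countP (fun a => hh ≤ a) : Int) ∧ (xs.countP (fun a => a ≤ hh) : Int) ≤ hh
    then hh else firstH xs h

-- A-side: the (x,y) fold is a pair of sums
theorem foldl_pair_sum (L : List (Int × Int)) (hh : Int) (a b : Int) :
    L.foldl (fun xy kv =>
      (if kv.1 ≥ hh then xy.1 + kv.2 else xy.1,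
       if kv.1 ≤ hh then xy.2 + kv.2 else xy.2)) (a, b)
    = (a + (L.map (fun kv => if kv.1 ≥ hh then kv.2 else 0)).sum,
       b + (L.map (fun kv => if kv.1 ≤ hh then kv.2 else 0)).sum) := by
  induction L generalizing a b with
  | nil => simp
  | cons kv t ih =>
    simp only [List.foldl_cons, List.map_cons, List.sum_cons, ih, Prod.mk.injEq]
    constructor <;> split_ifs <;> ring

-- sum of counts over a nodup key list covering xs = countP
theorem sum_ite_count (p : Int → Bool) :
    ∀ (ks xs : List Int), ks.Nodup → (∀ x ∈ xs, x ∈ ks) →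
    (ks.map (fun k => if p k then (xs.count k : Int) else 0)).sum = (xs.countP p : Int) := by
  intro ks
  induction ks with
  | nil =>
    intro xs _ hcov
    have : xs = [] := by
      cases xs with
      | nil => rfl
      | cons y ys => exact absurd (hcov y (by simp)) (by simp)
    simp [this]
  | cons k t ih =>
    intro xs hnd hcov
    have hknt : k ∉ t := (List.nodup_cons.mp hnd).1
    have hndt : t.Nodup := (List.nodup_cons.mp hnd).2
    set xs' := xs.filter (fun x => !(x == k)) with hxs'
    have hcov' : ∀ x ∈ xs', x ∈ t := by
      intro x hx
      have hmem := List.mem_of_mem_filter hx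
      have hne : ¬ (x == k) = true := by
        have := List.of_mem_filter hx
        simpa using this
      rcases List.mem_cons.mp (hcov x hmem) with h | h
      · exact absurd (by simp [h]) hne
      · exact h
    have hcnt : ∀ k' ∈ t, xs.count k' = xs'.count k' := by
      intro k' hk'
      have hnek : k' ≠ k := fun he => hknt (he ▸ hk')
      have hb : (!(k' == k)) = true := by simp [hnek]
      exact (List.count_filter (p := fun x => !(x == k)) hb).symm
    have hsplit : xs.countP p = (xs.filter (fun x => x == k)).countP p + xs'.countP p :=
      List.countP_eq_countP_filter_add xs p (fun x => x == k)
    have hfil : (xs.filter (fun x => x == k)).countP p = if p k then xs.count k else 0 := by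
      by_cases hpk : p k = true
      · rw [if_pos hpk]
        rw [List.countP_eq_length.mpr]
        · exact (List.count_eq_length_filter (a := k) (l := xs)).symm
        · intro a ha
          have h1 : (a == k) = true := List.of_mem_filter (p := fun x => x == k) ha
          have h2 : a = k := by simpa using h1
          simpa [h2] using hpk
      · rw [if_neg hpk, List.countP_eq_zero.mpr]
        intro a ha
        have h1 : (a == k) = true := List.of_mem_filter (p := fun x => x == k) ha
        have h2 : a = k := by simpa using h1
        simpa [h2] using hpk
    have hmapeq : t.map (fun k' => if p k' then (xs.count k' : Int) else 0)
        = t.map (fun k' => if p k' then (xs'.count k' : Int) else 0) := by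
      apply List.map_congr_left
      intro k' hk'
      rw [hcnt k' hk']
    calc (List.map (fun k' => if p k' then (xs.count k' : Int) else 0) (k :: t)).sum
        = (if p k then (xs.count k : Int) else 0)
          + (t.map (fun k' => if p k' then (xs'.count k' : Int) else 0)).sum := by
          simp [hmapeq]
      _ = (if p k then (xs.count k : Int) else 0) + (xs'.countP p : Int) := by
          rw [ih xs' hndt hcov']
      _ = (xs.countP p : Int) := by
          rw [hsplit, hfil]
          split_ifs <;> push_cast <;> ring

theorem solA_inner_eq (xs : List Int) (hh : Int) :
    solA_inner (PySem.Dict.counter xs) hh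
      = ((xs.countP (fun a => hh ≤ a) : Int), (xs.countP (fun a => a ≤ hh) : Int)) := by
  unfold solA_inner
  rw [PySem.Dict.items_counter, foldl_pair_sum]
  rw [List.map_map, List.map_map]
  have h1 := sum_ite_count (fun a => decide (hh ≤ a)) (PySem.Set.ofList xs) xs
    (PySem.Set.nodup_ofList xs) (fun x hx => (PySem.Set.mem_ofList xs x).mpr hx)
  have h2 := sum_ite_count (fun a => decide (a ≤ hh)) (PySem.Set.ofList xs) xs
    (PySem.Set.nodup_ofList xs) (fun x hx => (PySem.Set.mem_ofList xs x).mpr hx)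
  rw [Prod.mk.injEq]
  constructor
  · simpa [Function.comp, ge_iff_le] using h1
  · simpa [Function.comp] using h2

theorem solA_loop_eq (xs : List Int) (h : Nat) :
    solA_loop (PySem.Dict.counter xs) h = firstH xs h := by
  induction h with
  | zero => rfl
  | succ h ih =>
    simp only [solA_loop, firstH, solA_inner_eq, ih, ge_iff_le]

-- B-side: position characterisation in a sorted list
theorem pred_getElem_iff (p : Int → Bool)
    (hup : ∀ a b : Int, a ≤ b → p a = true → p b = true) :
    ∀ s : List Int, s.Pairwise (· ≤ ·) →
    ∀ k : Nat, (hk : k < s.length) →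
      (p s[k] = true ↔ s.countP (fun a => !p a) ≤ k) := by
  intro s
  induction s with
  | nil => intro _ k hk; simp at hk
  | cons a t ih =>
    intro hs k hk
    have hat := (List.pairwise_cons.mp hs).1
    have hst := (List.pairwise_cons.mp hs).2
    have hall : p a = true → t.countP (fun x => !p x) = 0 := by
      intro hpa
      apply List.countP_eq_zero.mpr
      intro b hb
      simp [hup a b (hat b hb) hpa]
    cases k with
    | zero =>
      by_cases hpa : p a = true
      · simp [List.countP_cons, hpa, hall hpa]
      · simp only [List.getElem_cons_zero]
        simp [List.countP_cons, hpa]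
    | succ k =>
      have hk' : k < t.length := by simpa using hk
      have := ih hst k hk'
      by_cases hpa : p a = true
      · have h0 := hall hpa
        simp only [List.getElem_cons_succ]
        have hpt : p t[k] = true := by
          rw [this, h0]; omega
        simp [List.countP_cons, hpa, h0, hpt]
      · simp only [List.getElem_cons_succ]
        rw [this]
        simp [List.countP_cons, hpa]

theorem descWhile_eq (s : List Int) (p : Int → Bool)
    (hup : ∀ a b : Int, a ≤ b → p a = true → p b = true)
    (hs : s.Pairwise (· ≤ ·)) :
    ∀ i : Nat, s.countP (fun a => !p a) ≤ i → i ≤ s.length →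
      descWhile s p i = s.countP (fun a => !p a) := by
  intro i
  induction i with
  | zero => intro hub _; unfold descWhile; omega
  | succ i ih =>
    intro hub hin
    have hi : i < s.length := by omega
    have hget : PySem.List.pyGetD s (i : Int) 0 = s[i] := by
      rw [PySem.List.pyGetD_eq_getElem s 0 (by omega) (by exact_mod_cast hi)]
      simp
    unfold descWhile
    rw [hget]
    by_cases hc : s.countP (fun a => !p a) ≤ i
    · have hp : p s[i] = true := (pred_getElem_iff p hup s hs i hi).mpr hc
      rw [hp]
      simp only [if_true]
      exact ih hc (le_of_lt hi)
    · have hp : ¬ p s[i] = true := fun hp => hc ((pred_getElem_iff p hup s hs i hi).mp hp)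
      rw [Bool.not_eq_true] at hp
      rw [hp]
      simp only [Bool.false_eq_true, if_false]
      omega

theorem solB_loop_eq (s : List Int) (hs : s.Pairwise (· ≤ ·)) :
    ∀ (h i j : Nat),
      s.countP (fun a => !(decide ((h : Int) ≤ a))) ≤ i → i ≤ s.length →
      s.countP (fun a => !(decide ((h : Int) < a))) ≤ j → j ≤ s.length →
      solB_loop s s.length h i j = firstH s h := by
  intro h
  induction h with
  | zero => intro i j _ _ _ _; rfl
  | succ h ih =>
    intro i j hi1 hi2 hj1 hj2
    have hcast : ((h + 1 : Nat) : Int) = (h : Int) + 1 := by push_cast; ring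
    have hup1 : ∀ a b : Int, a ≤ b → decide ((h : Int) + 1 ≤ a) = true → decide ((h : Int) + 1 ≤ b) = true := by
      intro a b hab ha; simp at *; omega
    have hup2 : ∀ a b : Int, a ≤ b → decide ((h : Int) + 1 < a) = true → decide ((h : Int) + 1 < b) = true := by
      intro a b hab ha; simp at *; omega
    have hi1' : s.countP (fun a => !decide ((h : Int) + 1 ≤ a)) ≤ i := by
      rw [show (fun a => !decide ((h : Int) + 1 ≤ a)) = (fun a => !decide (((h + 1 : Nat) : Int) ≤ a)) by funext a; rw [hcast]]
      exact hi1
    have hj1' : s.countP (fun a => !decide ((h : Int) + 1 < a)) ≤ j := by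
      rw [show (fun a => !decide ((h : Int) + 1 < a)) = (fun a => !decide (((h + 1 : Nat) : Int) < a)) by funext a; rw [hcast]]
      exact hj1
    have hdi := descWhile_eq s (fun a => decide ((h : Int) + 1 ≤ a)) hup1 hs i hi1' hi2
    have hdj := descWhile_eq s (fun a => decide ((h : Int) + 1 < a)) hup2 hs j hj1' hj2
    simp only [solB_loop, firstH]
    rw [hdi, hdj]
    have hpart : s.length = s.countP (fun a => decide ((h : Int) + 1 ≤ a))
        + s.countP (fun a => !decide ((h : Int) + 1 ≤ a)) := by
      rw [List.length_eq_countP_add_countP (fun a => decide ((h : Int) + 1 ≤ a))]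
      congr 1
      apply List.countP_congr
      intro a _
      by_cases hx : (h : Int) + 1 ≤ a <;> simp [hx]
    have hc2 : s.countP (fun a => !decide ((h : Int) + 1 < a)) = s.countP (fun a => decide (a ≤ (h : Int) + 1)) := by
      apply List.countP_congr
      intro a _
      by_cases hh : (h : Int) + 1 < a <;> simp [hh] <;> omega
    have hcond : ((s.length : Int) - (s.countP (fun a => !decide ((h : Int) + 1 ≤ a)) : Int) ≥ (h : Int) + 1
        ∧ ((s.countP (fun a => !decide ((h : Int) + 1 < a)) : Int) ≤ (h : Int) + 1))
        ↔ ((h : Int) + 1 ≤ (s.countP (fun a => (h : Int) + 1 ≤ a) : Int)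
           ∧ (s.countP (fun a => a ≤ (h : Int) + 1) : Int) ≤ (h : Int) + 1) := by
      rw [hc2]
      constructor
      · rintro ⟨h1, h2⟩
        exact ⟨by omega, h2⟩
      · rintro ⟨h1, h2⟩
        exact ⟨by omega, h2⟩
    by_cases hcnd : ((s.length : Int) - (s.countP (fun a => !decide ((h : Int) + 1 ≤ a)) : Int) ≥ (h : Int) + 1
        ∧ ((s.countP (fun a => !decide ((h : Int) + 1 < a)) : Int) ≤ (h : Int) + 1))
    · rw [if_pos hcnd, if_pos (hcond.mp hcnd)]
    · rw [if_neg hcnd, if_neg (fun hx => hcnd (hcond.mpr hx))]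
      apply ih
      · apply List.countP_mono_left
        intro x _ hx
        simp only [Bool.not_eq_true', decide_eq_false_iff_not, not_le] at *
        omega
      · exact List.countP_le_length
      · apply List.countP_mono_left
        intro x _ hx
        simp only [Bool.not_eq_true', decide_eq_false_iff_not, not_lt] at *
        omega
      · exact List.countP_le_length

theorem firstH_perm {xs ys : List Int} (hp : xs.Perm ys) (h : Nat) :
    firstH xs h = firstH ys h := by
  induction h with
  | zero => rfl
  | succ h ih =>
    simp only [firstH, ih, hp.countP_eq]

-- ===== VERDICT (by name: the statement is the Claim_ definition above) =====
theorem solution_spec : Claim_equal_solution := by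
  intro citations _
  show solA_loop (PySem.Dict.counter (PySem.List.sorted citations (fun x => x) true))
        (PySem.List.sorted citations (fun x => x) true).length
      = solB_loop (PySem.List.sorted citations (fun x => x) false)
        (PySem.List.sorted citations (fun x => x) false).length
        (PySem.List.sorted citations (fun x => x) false).length
        (PySem.List.sorted citations (fun x => x) false).length
        (PySem.List.sorted citations (fun x => x) false).length
  have hpw : (PySem.List.sorted citations (fun x => x) false).Pairwise (· ≤ ·) :=
    PySem.List.sorted_pairwise citations (fun x => x)
  rw [solA_loop_eq]
  rw [solB_loop_eq _ hpw _ _ _ List.countP_le_length (le_refl _) List.countP_le_length (le_refl _)]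
  rw [PySem.List.length_sorted, PySem.List.length_sorted]
  exact firstH_perm ((PySem.List.sorted_perm citations (fun x => x) true).trans
    (PySem.List.sorted_perm citations (fun x => x) false).symm) _
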